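-- pv_equiv track=rewrite | github.com/sr33j/FindYourPokemon | Pokedex.py | closest_prefix
-- ===== SOURCE A (Python) =====
-- def commonPrefixLength(str1, str2):
-- 	length = 0
-- 	for i in range(len(str1)):
-- 		if str1[i] == str2[i]:
-- 			length+=1
-- 		else:
-- 			break
-- 	return length
--
-- def closest_prefix(name, closePokemon):
-- 	prefixLen = 0
-- 	your_pokemon = []
-- 	for pokemon in closePokemon:
-- 		match = commonPrefixLength(name, pokemon)
-- 		if match > prefixLen:
-- 			your_pokemon = [pokemon]
-- 			prefixLen = match
-- 		elif match == prefixLen: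
-- 			your_pokemon.append(pokemon)
-- 	return your_pokemon
-- ===== SOURCE B (Python) =====
-- def commonPrefixLength(str1, str2):
--     n = 0
--     for a, b in zip(str1, str2):
--         if a != b:
--             break
--         n += 1
--     return n
--
-- def closest_prefix(name, closePokemon):
--     matches = [commonPrefixLength(name, p) for p in closePokemon]
--     m = max(matches, default=0)
--     return [p for p, ml in zip(closePokemon, matches) if ml == m]
-- ===== Notes on version B (the rewrite author's own statement) =====
-- stated objective: simpler
-- what changed: A keeps a running maximum and a result list that it resets whenever a longer match appears; B builds the full table of common-prefix lengths first, takes its maximum, and filters the pokemon whose match equals it (two plain passes, no resetting accumulator).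
import Mathlib
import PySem

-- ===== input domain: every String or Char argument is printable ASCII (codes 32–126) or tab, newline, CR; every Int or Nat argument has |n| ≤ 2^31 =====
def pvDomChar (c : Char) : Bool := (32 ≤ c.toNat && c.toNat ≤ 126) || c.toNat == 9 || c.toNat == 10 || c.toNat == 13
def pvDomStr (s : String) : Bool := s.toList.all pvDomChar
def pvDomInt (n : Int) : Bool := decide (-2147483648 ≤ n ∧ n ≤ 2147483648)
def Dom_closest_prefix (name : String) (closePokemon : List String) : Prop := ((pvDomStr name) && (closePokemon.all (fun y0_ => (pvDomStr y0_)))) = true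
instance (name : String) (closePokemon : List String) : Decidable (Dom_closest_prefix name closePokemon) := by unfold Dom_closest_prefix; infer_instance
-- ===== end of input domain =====

-- B replaces A's single-pass running-max loop (which resets the result list) by a two-pass
-- build-match-table-then-filter decomposition (objective: simpler).

-- ===== PORT A =====
-- commonPrefixLength's loop: for i in range(len(str1)): if str1[i] == str2[i] … else break.
-- str2[i] is PySem.List.pyGet?; none = IndexError (str2 a proper prefix of str1), excluded by Pre_.
def cplALoop (s2 : List Char) (i acc : Nat) : List Char → Option Nat
  | [] => some acc
  | c :: rest =>
    match PySem.List.pyGet? s2 (i : Int) with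
    | none => none
    | some c2 => if c == c2 then cplALoop s2 (i + 1) (acc + 1) rest else some acc

def commonPrefixLengthA (str1 str2 : String) : Option Nat :=
  cplALoop str2.toList 0 0 str1.toList

def cpLoopA (name : String) (prefixLen : Nat) (your : List String) : List String → Option (List String)
  | [] => some your
  | p :: rest =>
    match commonPrefixLengthA name p with
    | none => none
    | some m =>
      if m > prefixLen then cpLoopA name m [p] rest
      else if m = prefixLen then cpLoopA name prefixLen (your ++ [p]) rest
      else cpLoopA name prefixLen your rest

def closest_prefix (name : String) (closePokemon : List String) : List String :=
  (cpLoopA name 0 [] closePokemon).getD []   -- none = IndexError; those inputs are excluded by Pre_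

-- ===== PORT B =====
-- Source B's commonPrefixLength: count matching pairs of zip(str1, str2) until the first mismatch.
def cplBLoop : List Char → List Char → Nat
  | c1 :: r1, c2 :: r2 => if c1 == c2 then cplBLoop r1 r2 + 1 else 0
  | _, _ => 0

def commonPrefixLengthB (str1 str2 : String) : Nat :=
  cplBLoop str1.toList str2.toList

def closest_prefix_alt (name : String) (closePokemon : List String) : List String :=
  let matchTable := closePokemon.map (fun p => commonPrefixLengthB name p)
  let m := matchTable.foldl max 0   -- max(matches, default=0); exact: Nat values are all ≥ 0
  ((closePokemon.zip matchTable).filter (fun pm => pm.2 == m)).map Prod.fst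

-- ===== PRECONDITION & SPEC =====
-- Pre_ excludes exactly the inputs where A raises IndexError: some pokemon is a proper prefix of name.
def Pre_closest_prefix (name : String) (closePokemon : List String) : Prop :=
  ∀ p ∈ closePokemon, ¬ (p.toList <+: name.toList ∧ p.toList.length < name.toList.length)

instance (name : String) (closePokemon : List String) : Decidable (Pre_closest_prefix name closePokemon) := by
  unfold Pre_closest_prefix; infer_instance

def pvWitness_closest_prefix : String × List String := ("pika", ["pikachu", "abra", "pi!"])

def Spec_closest_prefix (name : String) (closePokemon : List String) (out : List String) : Prop := out = closest_prefix_alt name closePokemon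
instance (name : String) (closePokemon : List String) (out : List String) : Decidable (Spec_closest_prefix name closePokemon out) := by unfold Spec_closest_prefix; infer_instance

-- ===== CLAIM (what is proved, stated in full; the proofs are below) =====
def Claim_equal_closest_prefix : Prop := ∀ (name : String) (closePokemon : List String), Dom_closest_prefix name closePokemon → Pre_closest_prefix name closePokemon → Spec_closest_prefix name closePokemon (closest_prefix name closePokemon)

-- ===== LEMMAS AND PROOFS =====

-- A's inner loop agrees with B's zip-count when str2's remaining suffix is not a proper prefix of the rest of str1.
theorem cplALoop_eq (s1 : List Char) : ∀ (t2 s2 : List Char) (i acc : Nat),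
    s2.drop i = t2 → ¬ (t2 <+: s1 ∧ t2.length < s1.length) →
    cplALoop s2 i acc s1 = some (acc + cplBLoop s1 t2) := by
  induction s1 with
  | nil => intro t2 s2 i acc _ _; simp [cplALoop, cplBLoop]
  | cons c rest ih =>
    intro t2 s2 i acc hdrop hpre
    cases t2 with
    | nil =>
      exact absurd ⟨List.nil_prefix, by simp⟩ hpre
    | cons d t2' =>
      have hget : PySem.List.pyGet? s2 (i : Int) = some d := by
        rw [PySem.List.pyGet?_natCast, ← List.head?_drop, hdrop]; rfl
      by_cases hcd : c = d
      · have hdrop' : s2.drop (i + 1) = t2' := by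
          rw [← List.tail_drop, hdrop]; rfl
        have hpre' : ¬ (t2' <+: rest ∧ t2'.length < rest.length) := by
          intro ⟨h1, h2⟩
          exact hpre ⟨List.cons_prefix_cons.mpr ⟨hcd.symm, h1⟩, by simpa using h2⟩
        simp only [cplALoop, hget, hcd, beq_self_eq_true, if_true]
        rw [ih t2' s2 (i + 1) (acc + 1) hdrop' hpre']
        simp [cplBLoop]
        omega
      · simp [cplALoop, cplBLoop, hget, hcd]

theorem cplA_eq (name p : String)
    (h : ¬ (p.toList <+: name.toList ∧ p.toList.length < name.toList.length)) :
    commonPrefixLengthA name p = some (commonPrefixLengthB name p) := by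
  unfold commonPrefixLengthA commonPrefixLengthB
  simpa using cplALoop_eq name.toList p.toList p.toList 0 0 (by simp) h

-- Proof-side pure version of A's loop (all matches computed with B's total commonPrefixLength).
def runA (name : String) (prefixLen : Nat) (your : List String) : List String → List String
  | [] => your
  | p :: rest =>
    let m := commonPrefixLengthB name p
    if m > prefixLen then runA name m [p] rest
    else if m = prefixLen then runA name prefixLen (your ++ [p]) rest
    else runA name prefixLen your rest

theorem cpLoopA_eq (name : String) : ∀ (cps : List String) (pl : Nat) (your : List String),
    (∀ p ∈ cps, ¬ (p.toList <+: name.toList ∧ p.toList.length < name.toList.length)) →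
    cpLoopA name pl your cps = some (runA name pl your cps) := by
  intro cps
  induction cps with
  | nil => intro pl your _; rfl
  | cons p rest ih =>
    intro pl your hpre
    have h := cplA_eq name p (hpre p (by simp))
    have hrest : ∀ q ∈ rest, ¬ (q.toList <+: name.toList ∧ q.toList.length < name.toList.length) :=
      fun q hq => hpre q (by simp [hq])
    simp only [cpLoopA, h, runA]
    split_ifs <;> exact ih _ _ hrest

-- The running-max loop produces exactly the elements whose match equals the global max
-- (prefixed by the accumulator iff no reset ever occurs).
theorem runA_eq (name : String) : ∀ (cps : List String) (pl : Nat) (your : List String),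
    runA name pl your cps =
      (if (cps.map (fun p => commonPrefixLengthB name p)).foldl max pl = pl then your else []) ++
        cps.filter (fun p => commonPrefixLengthB name p ==
          (cps.map (fun q => commonPrefixLengthB name q)).foldl max pl) := by
  intro cps
  induction cps with
  | nil => intro pl your; simp [runA]
  | cons p rest ih =>
    intro pl your
    set m := commonPrefixLengthB name p with hm
    by_cases h1 : m > pl
    · have hmax : max pl m = m := by omega
      have hge := (PySem.List.le_foldl_max (rest.map (fun q => commonPrefixLengthB name q)) m).1
      simp only [runA, ← hm, if_pos h1]
      rw [ih m [p], List.map_cons, List.foldl_cons, hmax]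
      have hne : (rest.map (fun q => commonPrefixLengthB name q)).foldl max m ≠ pl := by omega
      rw [if_neg hne]
      by_cases h2 : (rest.map (fun q => commonPrefixLengthB name q)).foldl max m = m
      · have hb : (m == (rest.map (fun q => commonPrefixLengthB name q)).foldl max m) = true := by
          rw [h2]; exact beq_self_eq_true m
        simp [← hm, h2]
      · have hb : (m == (rest.map (fun q => commonPrefixLengthB name q)).foldl max m) = false := by
          exact beq_eq_false_iff_ne.mpr (fun h => h2 h.symm)
        simp [← hm, hb, h2]
    · have hmax : max pl m = pl := by omega
      rw [List.map_cons, List.foldl_cons, hmax]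
      by_cases h2 : m = pl
      · simp only [runA, ← hm, if_neg h1, if_pos h2]
        rw [ih pl (your ++ [p])]
        by_cases h3 : (rest.map (fun q => commonPrefixLengthB name q)).foldl max pl = pl
        · have hb : (m == (rest.map (fun q => commonPrefixLengthB name q)).foldl max pl) = true := by
            rw [h3, h2]; exact beq_self_eq_true pl
          simp [← hm, h3, h2]
        · have hb : (m == (rest.map (fun q => commonPrefixLengthB name q)).foldl max pl) = false := by
            exact beq_eq_false_iff_ne.mpr (fun h => h3 (h2 ▸ h.symm))
          simp [← hm, hb, h3]
      · simp only [runA, ← hm, if_neg h1, if_neg h2]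
        rw [ih pl your]
        have hge := (PySem.List.le_foldl_max (rest.map (fun q => commonPrefixLengthB name q)) pl).1
        have hb : (m == (rest.map (fun q => commonPrefixLengthB name q)).foldl max pl) = false := by
          exact beq_eq_false_iff_ne.mpr (by omega)
        simp [← hm, hb]

-- B's zip-filter-map is a plain filter.
theorem zip_filter_map_eq (name : String) (m : Nat) : ∀ (cps : List String),
    ((cps.zip (cps.map (fun p => commonPrefixLengthB name p))).filter (fun pm => pm.2 == m)).map Prod.fst
      = cps.filter (fun p => commonPrefixLengthB name p == m) := by
  intro cps
  induction cps with
  | nil => rfl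
  | cons p rest ih =>
    simp only [List.map_cons, List.zip_cons_cons, List.filter]
    by_cases h : commonPrefixLengthB name p == m
    · simp [h, ih]
    · simp [h] at *
      simpa using ih

-- ===== VERDICT (by name: the statement is the Claim_ definition above) =====
theorem closest_prefix_spec : Claim_equal_closest_prefix := by
  intro name cps _ hpre
  unfold Spec_closest_prefix closest_prefix closest_prefix_alt
  rw [cpLoopA_eq name cps 0 [] hpre]
  simp only [Option.getD_some]
  rw [runA_eq name cps 0 [], zip_filter_map_eq]
  split_ifs <;> rfl
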